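-- pv_equiv track=rewrite | github.com/Ludrachel/ATV-SEM-16-T1 | maioremenorelemento.py | encontra_maior_menor
-- ===== SOURCE A (Python) =====
-- def encontra_maior_menor(matriz):
--     n = len(matriz)
--     linha_maior = coluna_maior = linha_menor = coluna_menor = 0
--     for i in range(n):
--         for j in range(n):
--             if matriz[i][j] > matriz[linha_maior][coluna_maior]:
--                 linha_maior, coluna_maior = i, j
--             elif matriz[i][j] < matriz[linha_menor][coluna_menor]:
--                 linha_menor, coluna_menor = i, j
--     return ((linha_maior, coluna_maior), (linha_menor, coluna_menor))
-- ===== SOURCE B (Python) =====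
-- def encontra_maior_menor(matriz):
--     n = len(matriz)
--     flat = [(matriz[i][j], i, j) for i in range(n) for j in range(n)]
--     if not flat:
--         return ((0, 0), (0, 0))
--     _, im, jm = max(flat, key=lambda t: t[0])
--     _, imin, jmin = min(flat, key=lambda t: t[0])
--     return ((im, jm), (imin, jmin))
-- ===== Notes on version B (the rewrite author's own statement) =====
-- stated objective: idiomatic
-- what changed: Replaces A's stateful nested-loop if/elif champion tracker with a row-major flattening into (value,i,j) triples and the built-in first-occurrence max/min keyed on the value.
import Mathlib
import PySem

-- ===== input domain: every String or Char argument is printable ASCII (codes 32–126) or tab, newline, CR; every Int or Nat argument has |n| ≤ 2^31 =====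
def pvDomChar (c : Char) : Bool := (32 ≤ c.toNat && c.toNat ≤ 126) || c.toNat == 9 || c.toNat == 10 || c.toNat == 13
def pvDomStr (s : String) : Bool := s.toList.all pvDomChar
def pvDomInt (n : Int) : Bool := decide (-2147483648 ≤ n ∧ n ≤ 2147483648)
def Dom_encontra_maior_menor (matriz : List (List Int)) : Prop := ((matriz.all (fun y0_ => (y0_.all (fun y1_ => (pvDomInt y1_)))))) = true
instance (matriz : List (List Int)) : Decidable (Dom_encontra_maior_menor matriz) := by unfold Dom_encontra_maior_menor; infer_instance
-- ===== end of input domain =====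

-- B changes the decomposition only (flatten once, then built-in first-occurrence max/min); same asymptotic cost.

-- ===== PORT A =====
-- matriz[i][j] (indices are in range under Pre_; pyGetD's default is never used there)
def mGet (matriz : List (List Int)) (i j : Int) : Int :=
  PySem.List.pyGetD (PySem.List.pyGetD matriz i []) j 0

def encontra_maior_menor (matriz : List (List Int)) : (Int × Int) × (Int × Int) :=
  let n : Int := matriz.length
  (PySem.List.pyRange 0 n 1).foldl (fun s i =>
    (PySem.List.pyRange 0 n 1).foldl (fun s j =>
      if mGet matriz i j > mGet matriz s.1.1 s.1.2 then ((i, j), s.2)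
      else if mGet matriz i j < mGet matriz s.2.1 s.2.2 then (s.1, (i, j))
      else s) s) ((0, 0), (0, 0))

-- ===== PORT B =====
-- flat = [(matriz[i][j], i, j) for i in range(n) for j in range(n)]
def flatTriples (matriz : List (List Int)) : List (Int × Int × Int) :=
  (PySem.List.pyRange 0 (matriz.length : Int) 1).flatMap (fun i =>
    (PySem.List.pyRange 0 (matriz.length : Int) 1).map (fun j => (mGet matriz i j, i, j)))

def encontra_maior_menor_alt (matriz : List (List Int)) : (Int × Int) × (Int × Int) :=
  match PySem.List.max? (flatTriples matriz) (fun t => t.1),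
        PySem.List.min? (flatTriples matriz) (fun t => t.1) with
  | some tmax, some tmin => ((tmax.2.1, tmax.2.2), (tmin.2.1, tmin.2.2))
  | _, _ => ((0, 0), (0, 0))

-- ===== PRECONDITION & SPEC =====
-- Pre_ excludes exactly the ragged inputs (some row shorter than len(matriz)) on which both
-- Pythons raise IndexError; A returns normally on every input satisfying Pre_.
def Pre_encontra_maior_menor (matriz : List (List Int)) : Prop :=
  (matriz.all (fun row => matriz.length ≤ row.length)) = true
instance (matriz : List (List Int)) : Decidable (Pre_encontra_maior_menor matriz) := by
  unfold Pre_encontra_maior_menor; infer_instance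
def pvWitness_encontra_maior_menor : List (List Int) := [[1, 2], [3, 0]]

def Spec_encontra_maior_menor (matriz : List (List Int)) (out : (Int × Int) × (Int × Int)) : Prop := out = encontra_maior_menor_alt matriz
instance (matriz : List (List Int)) (out : (Int × Int) × (Int × Int)) : Decidable (Spec_encontra_maior_menor matriz out) := by unfold Spec_encontra_maior_menor; infer_instance

-- ===== CLAIM (what is proved, stated in full; the proofs are below) =====
def Claim_equal_encontra_maior_menor : Prop := ∀ (matriz : List (List Int)), Dom_encontra_maior_menor matriz → Pre_encontra_maior_menor matriz → Spec_encontra_maior_menor matriz (encontra_maior_menor matriz)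

-- ===== LEMMAS AND PROOFS =====

-- max?/min? on a nonempty list are the running first-extremal foldl from the head
theorem max?_cons_foldl (t : Int × Int × Int) (ts : List (Int × Int × Int)) :
    PySem.List.max? (t :: ts) (fun x => x.1)
      = some (ts.foldl (fun m x => if m.1 < x.1 then x else m) t) := by
  show List.foldl _ (some t) ts = _
  induction ts generalizing t with
  | nil => rfl
  | cons x xs ih =>
    simp only [List.foldl_cons]
    by_cases h : t.1 < x.1
    · simp only [if_pos h]; exact ih x
    · simp only [if_neg h]; exact ih t

theorem min?_cons_foldl (t : Int × Int × Int) (ts : List (Int × Int × Int)) :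
    PySem.List.min? (t :: ts) (fun x => x.1)
      = some (ts.foldl (fun m x => if x.1 < m.1 then x else m) t) := by
  show List.foldl _ (some t) ts = _
  induction ts generalizing t with
  | nil => rfl
  | cons x xs ih =>
    simp only [List.foldl_cons]
    by_cases h : x.1 < t.1
    · simp only [if_pos h]; exact ih x
    · simp only [if_neg h]; exact ih t

-- the invariant: A's combined state is the pair of positions of B's running max and running min
theorem loop_inv (matriz : List (List Int)) (L : List (Int × Int × Int))
    (hL : ∀ t ∈ L, mGet matriz t.2.1 t.2.2 = t.1)
    (mx mn : Int × Int × Int)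
    (hmx : mGet matriz mx.2.1 mx.2.2 = mx.1)
    (hmn : mGet matriz mn.2.1 mn.2.2 = mn.1)
    (hle : mn.1 ≤ mx.1) :
    L.foldl (fun s t =>
        if t.1 > mGet matriz s.1.1 s.1.2 then ((t.2.1, t.2.2), s.2)
        else if t.1 < mGet matriz s.2.1 s.2.2 then (s.1, (t.2.1, t.2.2))
        else s) ((mx.2.1, mx.2.2), (mn.2.1, mn.2.2))
    = (((L.foldl (fun m x => if m.1 < x.1 then x else m) mx).2.1,
        (L.foldl (fun m x => if m.1 < x.1 then x else m) mx).2.2),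
       ((L.foldl (fun m x => if x.1 < m.1 then x else m) mn).2.1,
        (L.foldl (fun m x => if x.1 < m.1 then x else m) mn).2.2)) := by
  induction L generalizing mx mn with
  | nil => rfl
  | cons t ts ih =>
    obtain ⟨v, i, j⟩ := t
    have ht : mGet matriz i j = v := hL _ (List.mem_cons_self ..)
    have hts : ∀ t ∈ ts, mGet matriz t.2.1 t.2.2 = t.1 :=
      fun t h => hL t (List.mem_cons_of_mem _ h)
    simp only [List.foldl_cons, hmx, hmn]
    by_cases h1 : v > mx.1
    · rw [if_pos h1, if_pos (show mx.1 < v from h1), if_neg (show ¬ v < mn.1 by omega)]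
      exact ih hts (v, i, j) mn ht hmn (by omega)
    · rw [if_neg h1, if_neg (show ¬ mx.1 < v from h1)]
      by_cases h2 : v < mn.1
      · rw [if_pos h2, if_pos h2]
        exact ih hts mx (v, i, j) hmx ht (by omega)
      · rw [if_neg h2, if_neg h2]
        exact ih hts mx mn hmx hmn hle

-- A's nested loop is the fold of the same step over the flattened triple list
theorem foldA_eq_flat (matriz : List (List Int)) (init : (Int × Int) × (Int × Int)) :
    (PySem.List.pyRange 0 (matriz.length : Int) 1).foldl (fun s i =>
      (PySem.List.pyRange 0 (matriz.length : Int) 1).foldl (fun s j =>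
        if mGet matriz i j > mGet matriz s.1.1 s.1.2 then ((i, j), s.2)
        else if mGet matriz i j < mGet matriz s.2.1 s.2.2 then (s.1, (i, j))
        else s) s) init
    = (flatTriples matriz).foldl
       (fun s t =>
        if t.1 > mGet matriz s.1.1 s.1.2 then ((t.2.1, t.2.2), s.2)
        else if t.1 < mGet matriz s.2.1 s.2.2 then (s.1, (t.2.1, t.2.2))
        else s) init := by
  rw [flatTriples, List.foldl_flatMap]
  simp only [List.foldl_map]

-- every triple in the flattened list stores its own matrix entry
theorem flat_sound (matriz : List (List Int)) :
    ∀ t ∈ flatTriples matriz, mGet matriz t.2.1 t.2.2 = t.1 := by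
  intro t ht
  simp only [flatTriples, List.mem_flatMap, List.mem_map] at ht
  obtain ⟨i, -, j, -, rfl⟩ := ht
  rfl

-- ===== VERDICT (by name: the statement is the Claim_ definition above) =====
theorem encontra_maior_menor_spec : Claim_equal_encontra_maior_menor := by
  intro matriz _ _
  unfold Spec_encontra_maior_menor encontra_maior_menor encontra_maior_menor_alt
  rcases matriz with _ | ⟨r, rest⟩
  · rfl
  · set matriz := r :: rest with hm
    have hn : (0 : Int) < (matriz.length : Int) := by simp [hm]
    have hrange : PySem.List.pyRange 0 (matriz.length : Int) 1
        = 0 :: PySem.List.pyRange 1 (matriz.length : Int) 1 :=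
      PySem.List.pyRange_one_cons hn
    obtain ⟨ts, hflat⟩ : ∃ ts, flatTriples matriz = (mGet matriz 0 0, 0, 0) :: ts := by
      rw [flatTriples, hrange, List.flatMap_cons, List.map_cons, List.cons_append]
      exact ⟨_, rfl⟩
    have hsound : ∀ t ∈ ts, mGet matriz t.2.1 t.2.2 = t.1 := by
      intro t ht
      exact flat_sound matriz t (hflat ▸ List.mem_cons_of_mem _ ht)
    rw [foldA_eq_flat, hflat, max?_cons_foldl, min?_cons_foldl]
    have hstep0 : List.foldl (fun s t =>
        if t.1 > mGet matriz s.1.1 s.1.2 then ((t.2.1, t.2.2), s.2)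
        else if t.1 < mGet matriz s.2.1 s.2.2 then (s.1, (t.2.1, t.2.2))
        else s) (((0:Int), (0:Int)), ((0:Int), (0:Int))) ((mGet matriz 0 0, 0, 0) :: ts)
        = List.foldl (fun s t =>
        if t.1 > mGet matriz s.1.1 s.1.2 then ((t.2.1, t.2.2), s.2)
        else if t.1 < mGet matriz s.2.1 s.2.2 then (s.1, (t.2.1, t.2.2))
        else s) (((0:Int), (0:Int)), ((0:Int), (0:Int))) ts := by
      simp
    rw [hstep0]
    exact loop_inv matriz ts hsound (mGet matriz 0 0, 0, 0) (mGet matriz 0 0, 0, 0) rfl rfl le_rfl
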